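-- pv_equiv track=rewrite | github.com/jlbren/vcf-annotation-tool | vcf_annotate.py | rank_mutations
-- ===== SOURCE A (Python) =====
-- def rank_mutations(mutations):
--     """Method for determining the most deleterious mutation where multiple variants
--        are present.
--     Arguments:
--         mutations (list(str)): List of all mutation types from multiple variants.
--     Returns:
--         worst (string): Single most harmful mutation from list of variants.
--     """
--     worst = ''
--     for mutation in mutations:
--         # Complex mutations are the most harmful due to compounding effects.
--         if mutation == 'complex':
--             return mutation
--         # Indels are more harmful than substituions due to effects on
--         # downstream reading frames.
--         elif mutation == 'del' or mutation == 'ins':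
--             worst = mutation
--         # Substitutions (SNPs, MNPs) are least harmful.
--         elif mutation == '':
--             worst = mutation
--     return worst
-- ===== SOURCE B (Python) =====
-- def rank_mutations(mutations):
--     if 'complex' in mutations:
--         return 'complex'
--     for mutation in reversed(mutations):
--         if mutation in ('del', 'ins', ''):
--             return mutation
--     return ''
-- ===== Notes on version B (the rewrite author's own statement) =====
-- stated objective: simpler
-- what changed: Replaces the forward accumulator loop with a membership check for the complex type followed by a reverse-order early-exit scan returning the first qualifying element, which equals A's last such element.
import Mathlib
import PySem

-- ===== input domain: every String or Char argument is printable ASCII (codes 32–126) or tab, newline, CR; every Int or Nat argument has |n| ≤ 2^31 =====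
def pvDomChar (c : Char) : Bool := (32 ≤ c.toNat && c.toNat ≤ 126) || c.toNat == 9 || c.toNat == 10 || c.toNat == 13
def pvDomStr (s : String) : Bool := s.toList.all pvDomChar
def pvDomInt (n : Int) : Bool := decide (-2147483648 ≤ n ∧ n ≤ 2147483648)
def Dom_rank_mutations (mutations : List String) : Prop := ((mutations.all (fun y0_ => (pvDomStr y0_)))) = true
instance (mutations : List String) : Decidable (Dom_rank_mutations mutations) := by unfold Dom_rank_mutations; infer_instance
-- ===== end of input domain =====

-- B replaces A's forward accumulator loop with a 'complex' membership check plus a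
-- reverse-order early-exit scan (simpler decomposition, same O(n) cost).


-- ===== PORT A =====
-- literal transliteration of A's loop with accumulator `worst` and early return
def rank_mutations_loop (ms : List String) (worst : String) : String :=
  match ms with
  | [] => worst
  | m :: rest =>
    if m = "complex" then m
    else if m = "del" ∨ m = "ins" then rank_mutations_loop rest m
    else if m = "" then rank_mutations_loop rest m
    else rank_mutations_loop rest worst

def rank_mutations (mutations : List String) : String :=
  rank_mutations_loop mutations ""

-- ===== PORT B =====
def rank_mutations_alt (mutations : List String) : String :=
  if mutations.contains "complex" then "complex"
  else
    match mutations.reverse.find? (fun m => m == "del" || m == "ins" || m == "") with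
    | some m => m
    | none => ""

-- ===== PRECONDITION & SPEC =====
def Spec_rank_mutations (mutations : List String) (out : String) : Prop := out = rank_mutations_alt mutations
instance (mutations : List String) (out : String) : Decidable (Spec_rank_mutations mutations out) := by unfold Spec_rank_mutations; infer_instance

-- ===== CLAIM (what is proved, stated in full; the proofs are below) =====
def Claim_equal_rank_mutations : Prop := ∀ (mutations : List String), Dom_rank_mutations mutations → Spec_rank_mutations mutations (rank_mutations mutations)

-- ===== LEMMAS AND PROOFS =====
theorem rank_mutations_loop_eq (ms : List String) (worst : String) :
    rank_mutations_loop ms worst =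
      if "complex" ∈ ms then "complex"
      else ((ms.reverse.find? (fun m => m == "del" || m == "ins" || m == "")).getD worst) := by
  induction ms generalizing worst with
  | nil => simp [rank_mutations_loop]
  | cons m rest ih =>
    simp only [rank_mutations_loop, List.reverse_cons, List.find?_append, List.mem_cons]
    by_cases hc : m = "complex"
    · simp [hc]
    · have hns : ("complex" = m ∨ "complex" ∈ rest) ↔ ("complex" ∈ rest) := by
        constructor
        · rintro (h | h)
          · exact absurd h.symm hc
          · exact h
        · exact Or.inr
      rw [if_neg hc, if_congr hns rfl rfl]
      by_cases hp : m = "del" ∨ m = "ins"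
      · have hpm : (m == "del" || m == "ins" || m == "") = true := by
          rcases hp with h | h <;> simp [h]
        rw [if_pos hp, ih]
        by_cases hr : "complex" ∈ rest
        · simp [hr]
        · rw [if_neg hr, if_neg hr]
          cases rest.reverse.find? (fun m => m == "del" || m == "ins" || m == "") with
          | none => simp [List.find?, hpm]
          | some x => simp
      · rw [if_neg hp]
        by_cases he : m = ""
        · rw [if_pos he, ih]
          by_cases hr : "complex" ∈ rest
          · simp [hr]
          · rw [if_neg hr, if_neg hr]
            cases rest.reverse.find? (fun m => m == "del" || m == "ins" || m == "") with
            | none => simp [List.find?, he]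
            | some x => simp
        · have hpm : (m == "del" || m == "ins" || m == "") = false := by
            push Not at hp
            simp [hp.1, hp.2, he]
          rw [if_neg he, ih]
          by_cases hr : "complex" ∈ rest
          · simp [hr]
          · rw [if_neg hr, if_neg hr]
            cases rest.reverse.find? (fun m => m == "del" || m == "ins" || m == "") with
            | none => simp [List.find?, hpm]
            | some x => simp

-- ===== VERDICT (by name: the statement is the Claim_ definition above) =====
theorem rank_mutations_spec : Claim_equal_rank_mutations := by
  intro ms _
  unfold Spec_rank_mutations rank_mutations rank_mutations_alt
  rw [rank_mutations_loop_eq]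
  by_cases h : "complex" ∈ ms
  · rw [if_pos h, if_pos (List.contains_iff_mem.mpr h)]
  · rw [if_neg h, if_neg (fun hc => h (List.contains_iff_mem.mp hc))]
    cases ms.reverse.find? (fun m => m == "del" || m == "ins" || m == "") <;> simp
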